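-- pv_equiv track=rewrite | github.com/dannguy1/nas_processing | src/core/analyzer.py | _classify_session_type
-- ===== SOURCE A (Python) =====
-- from typing import Dict, List, Tuple, Optional, Any
--
-- def _classify_session_type(message_types: List[str]) -> str:
--     """Classify session type based on message types"""
--     message_types_lower = [mt.lower() for mt in message_types]
--
--     if any('attach' in mt for mt in message_types_lower):
--         return 'attach_session'
--     elif any('detach' in mt for mt in message_types_lower):
--         return 'detach_session'
--     elif any('security' in mt for mt in message_types_lower):
--         return 'security_session'
--     elif any('bearer' in mt for mt in message_types_lower):
--         return 'bearer_session'
--     else: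
--         return 'other_session'
-- ===== SOURCE B (Python) =====
-- def _classify_session_type(message_types):
--     """Classify session type based on message types"""
--     pairs = [('attach', 'attach_session'), ('detach', 'detach_session'),
--              ('security', 'security_session'), ('bearer', 'bearer_session')]
--     best = len(pairs)
--     for mt in message_types:
--         low = mt.lower()
--         rank = 0
--         for kw, _ in pairs:
--             if kw in low:
--                 break
--             rank += 1
--         best = min(best, rank)
--     return pairs[best][1] if best < len(pairs) else 'other_session'
-- ===== Notes on version B (the rewrite author's own statement) =====
-- stated objective: alternative
-- what changed: Replaced A's four separate priority-ordered any() scans over the lowered list with a keyword/label table and a single pass that tracks the minimum matching rank per message.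
import Mathlib
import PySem

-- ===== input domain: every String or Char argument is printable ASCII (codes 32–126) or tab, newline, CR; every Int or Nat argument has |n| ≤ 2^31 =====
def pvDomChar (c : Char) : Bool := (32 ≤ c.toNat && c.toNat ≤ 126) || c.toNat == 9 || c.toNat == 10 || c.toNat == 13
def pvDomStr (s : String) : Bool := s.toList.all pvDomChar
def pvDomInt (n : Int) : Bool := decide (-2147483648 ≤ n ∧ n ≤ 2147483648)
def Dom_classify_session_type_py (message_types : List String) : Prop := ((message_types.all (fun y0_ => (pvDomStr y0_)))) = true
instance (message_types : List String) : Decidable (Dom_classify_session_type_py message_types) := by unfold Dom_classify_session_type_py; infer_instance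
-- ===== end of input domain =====

-- B replaces A's four priority-ordered any() scans with one pass over the messages
-- tracking the minimum matching rank in a keyword/label table (objective: alternative).

-- ===== PORT A =====
def classify_session_type_py (message_types : List String) : String :=
  let lowered := message_types.map PySem.Str.lower
  if lowered.any (fun mt => PySem.Str.isIn "attach" mt) then "attach_session"
  else if lowered.any (fun mt => PySem.Str.isIn "detach" mt) then "detach_session"
  else if lowered.any (fun mt => PySem.Str.isIn "security" mt) then "security_session"
  else if lowered.any (fun mt => PySem.Str.isIn "bearer" mt) then "bearer_session"
  else "other_session"

-- ===== PORT B =====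
def bPairs : List (String × String) :=
  [("attach", "attach_session"), ("detach", "detach_session"),
   ("security", "security_session"), ("bearer", "bearer_session")]

-- the inner 'for kw, _ in pairs: if kw in low: break; rank += 1' loop: first matching rank
def bFirstRank (low : String) : List (String × String) → Nat
  | [] => 0
  | (kw, _) :: rest => if PySem.Str.isIn kw low then 0 else 1 + bFirstRank low rest

def classify_session_type_py_alt (message_types : List String) : String :=
  let best := message_types.foldl
    (fun best mt => min best (bFirstRank (PySem.Str.lower mt) bPairs)) bPairs.length
  if best < bPairs.length then (bPairs.getD best ("", "other_session")).2
  else "other_session"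

-- ===== PRECONDITION & SPEC =====
def Spec_classify_session_type_py (message_types : List String) (out : String) : Prop := out = classify_session_type_py_alt message_types
instance (message_types : List String) (out : String) : Decidable (Spec_classify_session_type_py message_types out) := by unfold Spec_classify_session_type_py; infer_instance

-- ===== CLAIM (what is proved, stated in full; the proofs are below) =====
def Claim_equal_classify_session_type_py : Prop := ∀ (message_types : List String), Dom_classify_session_type_py message_types → Spec_classify_session_type_py message_types (classify_session_type_py message_types)

-- ===== LEMMAS AND PROOFS =====

-- rank of one message, written as A's priority chain
def pvRank (mt : String) : Nat := bFirstRank (PySem.Str.lower mt) bPairs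

theorem pvRank_eq (mt : String) :
    pvRank mt =
      if PySem.Str.isIn "attach" (PySem.Str.lower mt) then 0
      else if PySem.Str.isIn "detach" (PySem.Str.lower mt) then 1
      else if PySem.Str.isIn "security" (PySem.Str.lower mt) then 2
      else if PySem.Str.isIn "bearer" (PySem.Str.lower mt) then 3
      else 4 := by
  unfold pvRank bPairs
  simp only [bFirstRank]
  split_ifs <;> rfl

theorem pvFold_le_init (mts : List String) (b : Nat) :
    mts.foldl (fun b mt => min b (pvRank mt)) b ≤ b := by
  induction mts generalizing b with
  | nil => simp
  | cons x t ih =>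
    simpa using le_trans (ih (min b (pvRank x))) (Nat.min_le_left _ _)

theorem pvFold_le_mem {mts : List String} {mt : String} (h : mt ∈ mts) (b : Nat) :
    mts.foldl (fun b mt => min b (pvRank mt)) b ≤ pvRank mt := by
  induction mts generalizing b with
  | nil => cases h
  | cons x t ih =>
    rcases List.mem_cons.mp h with rfl | hmem
    · exact le_trans (pvFold_le_init t _) (Nat.min_le_right _ _)
    · exact ih hmem _

theorem pvLe_fold {c : Nat} {mts : List String} (b : Nat) (hb : c ≤ b)
    (hall : ∀ mt ∈ mts, c ≤ pvRank mt) :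
    c ≤ mts.foldl (fun b mt => min b (pvRank mt)) b := by
  induction mts generalizing b with
  | nil => simpa using hb
  | cons x t ih =>
    exact ih _ (le_min hb (hall x (by simp))) (fun mt hm => hall mt (by simp [hm]))

theorem pvBest_eq {mts : List String} {c : Nat} (hc : c ≤ 4)
    (hex : c = 4 ∨ ∃ mt ∈ mts, pvRank mt = c)
    (hall : ∀ mt ∈ mts, c ≤ pvRank mt) :
    mts.foldl (fun b mt => min b (pvRank mt)) 4 = c := by
  refine Nat.le_antisymm ?_ (pvLe_fold 4 hc hall)
  rcases hex with rfl | ⟨mt, hmem, hr⟩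
  · exact pvFold_le_init mts 4
  · exact hr ▸ pvFold_le_mem hmem 4

theorem pvRank_eq_zero {mt : String} (h : PySem.Str.isIn "attach" (PySem.Str.lower mt) = true) :
    pvRank mt = 0 := by
  rw [pvRank_eq, if_pos h]

theorem pvRank_eq_one {mt : String} (h1 : ¬ PySem.Str.isIn "attach" (PySem.Str.lower mt) = true)
    (h : PySem.Str.isIn "detach" (PySem.Str.lower mt) = true) : pvRank mt = 1 := by
  rw [pvRank_eq, if_neg h1, if_pos h]

theorem pvRank_eq_two {mt : String} (h1 : ¬ PySem.Str.isIn "attach" (PySem.Str.lower mt) = true)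
    (h2 : ¬ PySem.Str.isIn "detach" (PySem.Str.lower mt) = true)
    (h : PySem.Str.isIn "security" (PySem.Str.lower mt) = true) : pvRank mt = 2 := by
  rw [pvRank_eq, if_neg h1, if_neg h2, if_pos h]

theorem pvRank_eq_three {mt : String} (h1 : ¬ PySem.Str.isIn "attach" (PySem.Str.lower mt) = true)
    (h2 : ¬ PySem.Str.isIn "detach" (PySem.Str.lower mt) = true)
    (h3 : ¬ PySem.Str.isIn "security" (PySem.Str.lower mt) = true)
    (h : PySem.Str.isIn "bearer" (PySem.Str.lower mt) = true) : pvRank mt = 3 := by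
  rw [pvRank_eq, if_neg h1, if_neg h2, if_neg h3, if_pos h]

theorem pvRank_eq_four {mt : String} (h1 : ¬ PySem.Str.isIn "attach" (PySem.Str.lower mt) = true)
    (h2 : ¬ PySem.Str.isIn "detach" (PySem.Str.lower mt) = true)
    (h3 : ¬ PySem.Str.isIn "security" (PySem.Str.lower mt) = true)
    (h4 : ¬ PySem.Str.isIn "bearer" (PySem.Str.lower mt) = true) : pvRank mt = 4 := by
  rw [pvRank_eq, if_neg h1, if_neg h2, if_neg h3, if_neg h4]

theorem pvRank_ge_one {mt : String}
    (h1 : ¬ PySem.Str.isIn "attach" (PySem.Str.lower mt) = true) : 1 ≤ pvRank mt := by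
  rw [pvRank_eq, if_neg h1]; split_ifs <;> omega

theorem pvRank_ge_two {mt : String}
    (h1 : ¬ PySem.Str.isIn "attach" (PySem.Str.lower mt) = true)
    (h2 : ¬ PySem.Str.isIn "detach" (PySem.Str.lower mt) = true) : 2 ≤ pvRank mt := by
  rw [pvRank_eq, if_neg h1, if_neg h2]; split_ifs <;> omega

theorem pvRank_ge_three {mt : String}
    (h1 : ¬ PySem.Str.isIn "attach" (PySem.Str.lower mt) = true)
    (h2 : ¬ PySem.Str.isIn "detach" (PySem.Str.lower mt) = true)
    (h3 : ¬ PySem.Str.isIn "security" (PySem.Str.lower mt) = true) : 3 ≤ pvRank mt := by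
  rw [pvRank_eq, if_neg h1, if_neg h2, if_neg h3]; split_ifs <;> omega

-- ===== VERDICT (by name: the statement is the Claim_ definition above) =====
theorem classify_session_type_py_spec : Claim_equal_classify_session_type_py := by
  intro mts _
  unfold Spec_classify_session_type_py classify_session_type_py classify_session_type_py_alt
  show _ = (if (mts.foldl (fun b mt => min b (pvRank mt)) 4) < bPairs.length
      then (bPairs.getD (mts.foldl (fun b mt => min b (pvRank mt)) 4) ("", "other_session")).2
      else "other_session")
  simp only [List.any_map, List.any_eq_true, Function.comp]
  by_cases h1 : ∃ x ∈ mts, PySem.Str.isIn "attach" (PySem.Str.lower x) = true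
  · obtain ⟨mt, hm, hk⟩ := h1
    rw [if_pos ⟨mt, hm, hk⟩,
      pvBest_eq (by omega) (Or.inr ⟨mt, hm, pvRank_eq_zero hk⟩) (fun _ _ => Nat.zero_le _)]
    decide
  · have a1 : ∀ x ∈ mts, ¬ PySem.Str.isIn "attach" (PySem.Str.lower x) = true := by
      simpa using h1
    rw [if_neg h1]
    by_cases h2 : ∃ x ∈ mts, PySem.Str.isIn "detach" (PySem.Str.lower x) = true
    · obtain ⟨mt, hm, hk⟩ := h2
      rw [if_pos ⟨mt, hm, hk⟩,
        pvBest_eq (by omega) (Or.inr ⟨mt, hm, pvRank_eq_one (a1 mt hm) hk⟩)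
          (fun mt hm => pvRank_ge_one (a1 mt hm))]
      decide
    · have a2 : ∀ x ∈ mts, ¬ PySem.Str.isIn "detach" (PySem.Str.lower x) = true := by
        simpa using h2
      rw [if_neg h2]
      by_cases h3 : ∃ x ∈ mts, PySem.Str.isIn "security" (PySem.Str.lower x) = true
      · obtain ⟨mt, hm, hk⟩ := h3
        rw [if_pos ⟨mt, hm, hk⟩,
          pvBest_eq (by omega) (Or.inr ⟨mt, hm, pvRank_eq_two (a1 mt hm) (a2 mt hm) hk⟩)
            (fun mt hm => pvRank_ge_two (a1 mt hm) (a2 mt hm))]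
        decide
      · have a3 : ∀ x ∈ mts, ¬ PySem.Str.isIn "security" (PySem.Str.lower x) = true := by
          simpa using h3
        rw [if_neg h3]
        by_cases h4 : ∃ x ∈ mts, PySem.Str.isIn "bearer" (PySem.Str.lower x) = true
        · obtain ⟨mt, hm, hk⟩ := h4
          rw [if_pos ⟨mt, hm, hk⟩,
            pvBest_eq (by omega)
              (Or.inr ⟨mt, hm, pvRank_eq_three (a1 mt hm) (a2 mt hm) (a3 mt hm) hk⟩)
              (fun mt hm => pvRank_ge_three (a1 mt hm) (a2 mt hm) (a3 mt hm))]
          decide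
        · have a4 : ∀ x ∈ mts, ¬ PySem.Str.isIn "bearer" (PySem.Str.lower x) = true := by
            simpa using h4
          rw [if_neg h4,
            pvBest_eq (le_refl 4) (Or.inl rfl)
              (fun mt hm => le_of_eq (pvRank_eq_four (a1 mt hm) (a2 mt hm) (a3 mt hm) (a4 mt hm)).symm)]
          decide
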